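-- pv_equiv track=rewrite | github.com/JaredTPonting/Chess | app/game/__init__.py | get_positions_between
-- ===== SOURCE A (Python) =====
-- def get_positions_between(start, end):
--     """Return all positions between two points (for sliding pieces like Rook, Bishop, Queen)"""
--     positions = []
--     row_step = col_step = 0
--
--     if start[0] < end[0]:
--         row_step = 1
--     elif start[0] > end[0]:
--         row_step = -1
--
--     if start[1] < end[1]:
--         col_step = 1
--     elif start[1] > end[1]:
--         col_step = -1
--
--     current_row, current_col = start[0] + row_step, start[1] + col_step
--
--     while (current_row, current_col) != end:
--         positions.append((current_row, current_col))
--         current_row += row_step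
--         current_col += col_step
--
--     return positions
-- ===== SOURCE B (Python) =====
-- def get_positions_between(start, end):
--     """Return all positions between two points (for sliding pieces like Rook, Bishop, Queen)"""
--     rows = list(range(start[0] + 1, end[0])) if start[0] < end[0] else list(range(start[0] - 1, end[0], -1))
--     cols = list(range(start[1] + 1, end[1])) if start[1] < end[1] else list(range(start[1] - 1, end[1], -1))
--     if not rows:
--         rows = [start[0]] * len(cols)
--     if not cols:
--         cols = [start[1]] * len(rows)
--     return list(zip(rows, cols))
-- ===== Notes on version B (the rewrite author's own statement) =====
-- stated objective: alternative
-- what changed: B decomposes the task per axis: it materialises the intermediate row coordinates and the intermediate column coordinates as two independent exclusive ranges, pads the constant axis by replicating its fixed coordinate, and zips the two sequences, instead of A's single-state while-loop that walks cell by cell comparing against the endpoint (and never terminates on misaligned points, which Pre_ excludes).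
import Mathlib
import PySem

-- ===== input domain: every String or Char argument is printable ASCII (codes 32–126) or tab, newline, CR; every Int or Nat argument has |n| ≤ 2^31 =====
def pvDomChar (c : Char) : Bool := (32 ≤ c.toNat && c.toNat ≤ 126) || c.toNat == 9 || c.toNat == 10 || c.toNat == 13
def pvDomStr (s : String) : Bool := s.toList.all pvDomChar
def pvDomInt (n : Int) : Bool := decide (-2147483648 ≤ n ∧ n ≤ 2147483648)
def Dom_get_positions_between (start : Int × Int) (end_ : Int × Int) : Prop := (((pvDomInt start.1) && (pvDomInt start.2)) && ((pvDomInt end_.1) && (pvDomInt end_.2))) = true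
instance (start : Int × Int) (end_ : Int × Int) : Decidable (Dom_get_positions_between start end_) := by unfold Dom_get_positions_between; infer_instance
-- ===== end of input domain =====

-- B builds the intermediate row coordinates and column coordinates as two independent
-- exclusive ranges, pads the constant axis by replication, and zips them; Pre_ restricts
-- to aligned points (same row, same column, or a diagonal), on which alone A's loop terminates.


-- ===== PORT A =====
-- A's while-loop; fuel only makes the loop total, on Pre_ it never runs out
def pvALoop (row_step col_step : Int) (end_ : Int × Int) (cr cc : Int) : Nat → List (Int × Int)
  | 0 => []
  | fuel + 1 =>
    if (cr, cc) = end_ then []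
    else (cr, cc) :: pvALoop row_step col_step end_ (cr + row_step) (cc + col_step) fuel

def get_positions_between (start : Int × Int) (end_ : Int × Int) : List (Int × Int) :=
  let row_step : Int := if start.1 < end_.1 then 1 else if start.1 > end_.1 then -1 else 0
  let col_step : Int := if start.2 < end_.2 then 1 else if start.2 > end_.2 then -1 else 0
  pvALoop row_step col_step end_ (start.1 + row_step) (start.2 + col_step)
    ((end_.1 - start.1).natAbs + (end_.2 - start.2).natAbs + 1)

-- ===== PORT B =====
def get_positions_between_alt (start : Int × Int) (end_ : Int × Int) : List (Int × Int) :=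
  let rows := if start.1 < end_.1 then PySem.List.pyRange (start.1 + 1) end_.1 1
              else PySem.List.pyRange (start.1 - 1) end_.1 (-1)
  let cols := if start.2 < end_.2 then PySem.List.pyRange (start.2 + 1) end_.2 1
              else PySem.List.pyRange (start.2 - 1) end_.2 (-1)
  let rows := if rows = [] then List.replicate cols.length start.1 else rows
  let cols := if cols = [] then List.replicate rows.length start.2 else cols
  rows.zip cols

-- ===== PRECONDITION & SPEC =====
-- Pre_ admits exactly the aligned point pairs (same row, same column, or an exact
-- diagonal); on any other pair A's while-loop never reaches end and loops forever.
def Pre_get_positions_between (start : Int × Int) (end_ : Int × Int) : Prop :=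
  end_.1 = start.1 ∨ end_.2 = start.2 ∨ (end_.1 - start.1).natAbs = (end_.2 - start.2).natAbs
instance (start : Int × Int) (end_ : Int × Int) : Decidable (Pre_get_positions_between start end_) := by unfold Pre_get_positions_between; infer_instance

def pvWitness_get_positions_between : (Int × Int) × (Int × Int) := ((1, 1), (4, 4))

def Spec_get_positions_between (start : Int × Int) (end_ : Int × Int) (out : List (Int × Int)) : Prop := out = get_positions_between_alt start end_
instance (start : Int × Int) (end_ : Int × Int) (out : List (Int × Int)) : Decidable (Spec_get_positions_between start end_ out) := by unfold Spec_get_positions_between; infer_instance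

-- ===== CLAIM (what is proved, stated in full; the proofs are below) =====
def Claim_equal_get_positions_between : Prop := ∀ (start : Int × Int) (end_ : Int × Int), Dom_get_positions_between start end_ → Pre_get_positions_between start end_ → Spec_get_positions_between start end_ (get_positions_between start end_)

-- ===== LEMMAS AND PROOFS =====

-- Walk characterisation: if end is exactly k steps ahead and the step is nonzero
-- (or k = 0), the loop emits the k strictly-before positions.
theorem pvALoop_spec (rs cs : Int) (k : Nat) :
    ∀ (cr cc : Int) (fuel : Nat), k < fuel → ((rs, cs) = (0, 0) → k = 0) →
    pvALoop rs cs (cr + (k : Int) * rs, cc + (k : Int) * cs) cr cc fuel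
      = (List.range k).map (fun j : Nat => (cr + (j : Int) * rs, cc + (j : Int) * cs)) := by
  induction k with
  | zero =>
    intro cr cc fuel hf _
    cases fuel with
    | zero => omega
    | succ f => simp [pvALoop]
  | succ k ih =>
    intro cr cc fuel hf hz
    cases fuel with
    | zero => omega
    | succ f =>
    have hne : ((cr, cc) : Int × Int) ≠ (cr + (↑(k+1)) * rs, cc + (↑(k+1)) * cs) := by
      intro h
      have h1 : (↑(k+1) : Int) * rs = 0 := by
        have hh := congrArg Prod.fst h; simp only at hh; linarith
      have h2 : (↑(k+1) : Int) * cs = 0 := by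
        have hh := congrArg Prod.snd h; simp only at hh; linarith
      have hknz : (↑(k+1) : Int) ≠ 0 := by positivity
      have hrs0 : rs = 0 := by rcases mul_eq_zero.mp h1 with h' | h'; exacts [absurd h' hknz, h']
      have hcs0 : cs = 0 := by rcases mul_eq_zero.mp h2 with h' | h'; exacts [absurd h' hknz, h']
      exact Nat.succ_ne_zero k (hz (by simp [hrs0, hcs0]))
    rw [pvALoop, if_neg hne]
    have hend : ((cr + (↑(k+1)) * rs, cc + (↑(k+1)) * cs) : Int × Int)
        = ((cr + rs) + (↑k) * rs, (cc + cs) + (↑k) * cs) := by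
      simp only [Prod.mk.injEq]; push_cast; constructor <;> ring
    rw [hend, ih (cr + rs) (cc + cs) f (Nat.lt_of_succ_lt_succ hf)
        (fun h => (Nat.succ_ne_zero k (hz h)).elim)]
    rw [List.range_succ_eq_map]
    simp only [List.map_cons, List.map_map]
    congr 1
    · simp
    · apply List.map_congr_left
      intro j _
      simp only [Function.comp]
      push_cast
      simp only [Prod.mk.injEq]
      constructor <;> ring

-- zip of two maps over the same range is the map of the pair
theorem pvZipMaps (n : Nat) (f g : Nat → Int) :
    ((List.range n).map f).zip ((List.range n).map g)
      = (List.range n).map (fun j => (f j, g j)) := by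
  rw [List.zip_map']

theorem pvReplicateAsMap (n : Nat) (a : Int) :
    List.replicate n a = (List.range n).map (fun _ => a) := by
  simp [List.map_const']

-- ===== VERDICT (by name: the statement is the Claim_ definition above) =====
theorem get_positions_between_spec : Claim_equal_get_positions_between := by
  intro start end_ _ hpre
  unfold Spec_get_positions_between get_positions_between get_positions_between_alt
  obtain ⟨sr, sc⟩ := start
  obtain ⟨er, ec⟩ := end_
  simp only
  set dr := er - sr with hdr
  set dc := ec - sc with hdc
  set rs : Int := (if sr < er then (1:Int) else if sr > er then -1 else 0) with hrsd
  set cs : Int := (if sc < ec then (1:Int) else if sc > ec then -1 else 0) with hcsd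
  set mr : Nat := dr.natAbs - 1 with hmr
  set mc : Nat := dc.natAbs - 1 with hmc
  set k : Nat := max dr.natAbs dc.natAbs with hk
  have hpre' : er = sr ∨ ec = sc ∨ dr.natAbs = dc.natAbs := hpre
  set f : Nat → Int := fun j => (sr + rs) + (j : Int) * rs with hf
  set g : Nat → Int := fun j => (sc + cs) + (j : Int) * cs with hg
  -- axis lists in map-over-range form
  have hrows : (if sr < er then PySem.List.pyRange (sr + 1) er 1
                else PySem.List.pyRange (sr - 1) er (-1))
      = (List.range mr).map f := by
    rcases lt_trichotomy sr er with h | h | h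
    · rw [if_pos h, PySem.List.pyRange_one]
      have hrs1 : rs = 1 := by simp [hrsd, h]
      have hlen : (er - (sr + 1)).toNat = mr := by simp only [hmr, hdr]; omega
      rw [hlen, hf, hrs1]
      apply List.map_congr_left; intro j _; ring
    · rw [if_neg (by omega), PySem.List.pyRange_neg_one]
      have hmr0 : mr = 0 := by simp only [hmr, hdr]; omega
      have hlen : (sr - 1 - er).toNat = 0 := by omega
      rw [hlen, hmr0]; simp
    · rw [if_neg (by omega), PySem.List.pyRange_neg_one]
      have hrs1 : rs = -1 := by simp [hrsd, h, asymm h]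
      have hlen : (sr - 1 - er).toNat = mr := by simp only [hmr, hdr]; omega
      rw [hlen, hf, hrs1]
      apply List.map_congr_left; intro j _; ring
  have hcols : (if sc < ec then PySem.List.pyRange (sc + 1) ec 1
                else PySem.List.pyRange (sc - 1) ec (-1))
      = (List.range mc).map g := by
    rcases lt_trichotomy sc ec with h | h | h
    · rw [if_pos h, PySem.List.pyRange_one]
      have hcs1 : cs = 1 := by simp [hcsd, h]
      have hlen : (ec - (sc + 1)).toNat = mc := by simp only [hmc, hdc]; omega
      rw [hlen, hg, hcs1]
      apply List.map_congr_left; intro j _; ring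
    · rw [if_neg (by omega), PySem.List.pyRange_neg_one]
      have hmc0 : mc = 0 := by simp only [hmc, hdc]; omega
      have hlen : (sc - 1 - ec).toNat = 0 := by omega
      rw [hlen, hmc0]; simp
    · rw [if_neg (by omega), PySem.List.pyRange_neg_one]
      have hcs1 : cs = -1 := by simp [hcsd, h, asymm h]
      have hlen : (sc - 1 - ec).toNat = mc := by simp only [hmc, hdc]; omega
      rw [hlen, hg, hcs1]
      apply List.map_congr_left; intro j _; ring
  rw [hrows, hcols]
  -- B-side: the padded zip is a single map over range (k-1)
  have hB : (let rows := (List.range mr).map f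
             let cols := (List.range mc).map g
             let rows := if rows = [] then List.replicate cols.length sr else rows
             let cols := if cols = [] then List.replicate rows.length sc else cols
             rows.zip cols)
      = (List.range (k - 1)).map (fun j : Nat => (f j, g j)) := by
    simp only
    by_cases hmr0 : mr = 0
    · by_cases hmc0 : mc = 0
      · -- both axes have no strict interior
        have hk1 : k - 1 = 0 := by
          rcases hpre' with h | h | h <;> simp only [hk] <;> omega
        simp [hmr0, hmc0, hk1]
      · -- row axis constant: dr = 0 and rs = 0, pad rows
        have hdr0 : dr = 0 := by
          rcases hpre' with h | h | h
          · simp only [hdr]; omega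
          · exfalso; apply hmc0; simp only [hmc, hdc]; omega
          · exfalso; apply hmc0; omega
        have hrs0 : rs = 0 := by simp only [hrsd]; split_ifs <;> omega
        have hk1 : k - 1 = mc := by simp only [hk, hmc]; omega
        have hcne : (List.range mc).map g ≠ [] := by
          simp [List.map_eq_nil_iff, List.range_eq_nil, hmc0]
        rw [if_pos (by simp [hmr0]), if_neg hcne, List.length_map, List.length_range,
            pvReplicateAsMap, pvZipMaps, hk1]
        apply List.map_congr_left; intro j _
        simp [hf, hrs0]
    · have hrne : (List.range mr).map f ≠ [] := by
        simp [List.map_eq_nil_iff, List.range_eq_nil, hmr0]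
      by_cases hmc0 : mc = 0
      · -- column axis constant: dc = 0 and cs = 0, pad cols
        have hdc0 : dc = 0 := by
          rcases hpre' with h | h | h
          · exfalso; apply hmr0; simp only [hmr, hdr]; omega
          · simp only [hdc]; omega
          · exfalso; apply hmr0; omega
        have hcs0 : cs = 0 := by simp only [hcsd]; split_ifs <;> omega
        have hk1 : k - 1 = mr := by simp only [hk, hmr]; omega
        rw [if_neg hrne, if_pos (by simp [hmc0]), List.length_map,
            List.length_range, pvReplicateAsMap, pvZipMaps, hk1]
        apply List.map_congr_left; intro j _
        simp [hg, hcs0]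
      · -- diagonal: mr = mc = k - 1
        have hcne : (List.range mc).map g ≠ [] := by
          simp [List.map_eq_nil_iff, List.range_eq_nil, hmc0]
        have heq : mr = mc := by
          rcases hpre' with h | h | h
          · exfalso; apply hmr0; simp only [hmr, hdr]; omega
          · exfalso; apply hmc0; simp only [hmc, hdc]; omega
          · simp only [hmr, hmc]; omega
        have hk1 : k - 1 = mr := by simp only [hk, hmr]; omega
        rw [if_neg hrne, if_neg hcne, heq, pvZipMaps, hk1, heq]
  rw [hB]
  -- A-side: the loop walks exactly k - 1 cells
  have hkr : (k : Int) * rs = dr := by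
    by_cases h0 : dr = 0
    · have : rs = 0 := by simp only [hrsd]; split_ifs <;> simp only [hdr] at h0 <;> omega
      rw [this, mul_zero, h0]
    · have hkval : (k : Int) = dr.natAbs := by
        rcases hpre' with h | h | h <;> simp only [hk] <;> simp only [hdr] at * <;> omega
      rcases lt_trichotomy dr 0 with h | h | h
      · have : rs = -1 := by simp only [hrsd]; split_ifs <;> simp only [hdr] at h <;> omega
        rw [this, hkval]; omega
      · exact absurd h h0
      · have : rs = 1 := by simp only [hrsd]; split_ifs <;> simp only [hdr] at h <;> omega
        rw [this, hkval]; omega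
  have hkc : (k : Int) * cs = dc := by
    by_cases h0 : dc = 0
    · have : cs = 0 := by simp only [hcsd]; split_ifs <;> simp only [hdc] at h0 <;> omega
      rw [this, mul_zero, h0]
    · have hkval : (k : Int) = dc.natAbs := by
        rcases hpre' with h | h | h <;> simp only [hk] <;> simp only [hdc] at * <;> omega
      rcases lt_trichotomy dc 0 with h | h | h
      · have : cs = -1 := by simp only [hcsd]; split_ifs <;> simp only [hdc] at h <;> omega
        rw [this, hkval]; omega
      · exact absurd h h0
      · have : cs = 1 := by simp only [hcsd]; split_ifs <;> simp only [hdc] at h <;> omega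
        rw [this, hkval]; omega
  rcases Nat.eq_zero_or_pos k with hk0 | hkpos
  · have hdr0 : dr = 0 := by omega
    have hdc0 : dc = 0 := by omega
    have hrs0 : rs = 0 := by simp only [hrsd]; split_ifs <;> simp only [hdr] at hdr0 <;> omega
    have hcs0 : cs = 0 := by simp only [hcsd]; split_ifs <;> simp only [hdc] at hdc0 <;> omega
    have her : er = sr := by simp only [hdr] at hdr0; omega
    have hec : ec = sc := by simp only [hdc] at hdc0; omega
    rw [hk0]
    simp [pvALoop, her, hec, hrs0, hcs0]
  · have hzk : (rs, cs) = ((0:Int), 0) → k - 1 = 0 := by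
      intro h
      have h1 : rs = 0 := congrArg Prod.fst h
      have h2 : cs = 0 := congrArg Prod.snd h
      have hd1 : dr = 0 := by rw [← hkr, h1, mul_zero]
      have hd2 : dc = 0 := by rw [← hkc, h2, mul_zero]
      simp only [hk]; omega
    have hend : ((er, ec) : Int × Int)
        = ((sr + rs) + (↑(k-1)) * rs, (sc + cs) + (↑(k-1)) * cs) := by
      have hcast : (↑(k-1) : Int) = (k : Int) - 1 := by omega
      simp only [Prod.mk.injEq, hcast, sub_one_mul]
      constructor
      · have := hkr; simp only [hdr] at this; omega
      · have := hkc; simp only [hdc] at this; omega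
    have hfuel : k - 1 < dr.natAbs + dc.natAbs + 1 := by simp only [hk]; omega
    rw [hend, pvALoop_spec rs cs (k-1) (sr + rs) (sc + cs) _ hfuel hzk]
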